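-- pv_equiv track=rewrite | github.com/yudh1232/Programmers-Algorithm | 예산.py | solution
-- ===== SOURCE A (Python) =====
-- def solution(d, budget):
--     answer = 0
--
--     # d를 오름차순으로 정렬
--     d.sort()
--
--     # d를 순회
--     for money in d:
--         # 현재 부서의 신청금액이 budget보다 크다면 반복종료
--         if money > budget:
--             break
--
--         # budget에서 현재 부서의 신청금액을 뺌
--         budget -= money
--         # 지원횟수 증가
--         answer += 1
--
--     # 결과 리턴
--     return answer
-- ===== SOURCE B (Python) =====
-- def solution(d, budget):
--     # Selection-based greedy: repeatedly fund the cheapest remaining request,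
--     # no sorting at all.  (Unlike A, this does not mutate d; return value only.)
--     count = 0
--     pool = list(d)
--     while pool:
--         m = min(pool)
--         if m > budget:
--             break
--         budget -= m
--         pool.remove(m)
--         count += 1
--     return count
-- ===== Notes on version B (the rewrite author's own statement) =====
-- stated objective: alternative
-- what changed: Removes the sort entirely: instead of sorting d and scanning it with a running subtraction, B repeatedly extracts the minimum of a working copy (selection-based greedy loop with min/remove), stopping when the cheapest remaining request exceeds the leftover budget.
import Mathlib
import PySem

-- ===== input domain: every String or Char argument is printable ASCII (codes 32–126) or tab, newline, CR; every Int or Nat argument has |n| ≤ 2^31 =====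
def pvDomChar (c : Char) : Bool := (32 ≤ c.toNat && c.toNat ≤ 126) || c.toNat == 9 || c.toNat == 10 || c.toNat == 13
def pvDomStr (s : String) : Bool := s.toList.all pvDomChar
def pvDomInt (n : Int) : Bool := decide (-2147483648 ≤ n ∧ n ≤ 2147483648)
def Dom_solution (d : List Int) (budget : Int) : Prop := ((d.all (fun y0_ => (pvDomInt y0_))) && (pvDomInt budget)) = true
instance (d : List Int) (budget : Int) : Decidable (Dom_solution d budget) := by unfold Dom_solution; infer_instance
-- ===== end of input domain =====

-- B removes the sort: a selection-based greedy loop (min + remove on a working copy).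
-- A sorts d in place; B does not mutate d — the equivalence proved is about the return value only.

-- ===== PORT A =====
-- loop over the sorted list: subtract each request from the budget, break when it exceeds it
def solutionLoop : List Int → Int → Int → Int
  | [], _, answer => answer
  | money :: rest, b, answer =>
      if money > b then answer else solutionLoop rest (b - money) (answer + 1)

def solution (d : List Int) (budget : Int) : Int :=
  solutionLoop (PySem.List.sorted d (fun x => x)) budget 0

-- ===== PORT B =====
-- while pool: m = min(pool); if m > budget: break; budget -= m; pool.remove(m); count += 1
def selLoop (pool : List Int) (b : Int) (cnt : Int) : Int :=
  match hm : PySem.List.min? pool (fun x => x) with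
  | none => cnt
  | some m =>
      if m > b then cnt
      else selLoop (pool.erase m) (b - m) (cnt + 1)
termination_by pool.length
decreasing_by
  rw [List.length_erase_of_mem (PySem.List.min?_mem hm)]
  have := List.length_pos_of_mem (PySem.List.min?_mem hm); omega

def solution_alt (d : List Int) (budget : Int) : Int :=
  selLoop d budget 0

-- ===== PRECONDITION & SPEC =====
def Spec_solution (d : List Int) (budget : Int) (out : Int) : Prop := out = solution_alt d budget
instance (d : List Int) (budget : Int) (out : Int) : Decidable (Spec_solution d budget out) := by unfold Spec_solution; infer_instance

-- ===== CLAIM (what is proved, stated in full; the proofs are below) =====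
def Claim_equal_solution : Prop := ∀ (d : List Int) (budget : Int), Dom_solution d budget → Spec_solution d budget (solution d budget)

-- ===== LEMMAS AND PROOFS =====

-- the stable sort of pool is its first minimum followed by the sort of the rest
theorem sorted_eq_min_cons (pool : List Int) (m : Int)
    (hm : PySem.List.min? pool (fun x => x) = some m) :
    PySem.List.sorted pool (fun x => x) = m :: PySem.List.sorted (pool.erase m) (fun x => x) := by
  apply PySem.List.sorted_id_eq_of_perm_of_pairwise
  · exact ((PySem.List.sorted_perm (pool.erase m) (fun x => x) false).cons m).trans
      (List.perm_cons_erase (PySem.List.min?_mem hm)).symm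
  · refine List.pairwise_cons.mpr ⟨?_, ?_⟩
    · intro y hy
      exact PySem.List.min?_isMin hm y
        (List.mem_of_mem_erase ((PySem.List.sorted_perm _ _ _).mem_iff.mp hy))
    · exact PySem.List.sorted_pairwise _ _

-- B's selection loop computes the same value as A's scan of the sorted list
theorem selLoop_eq (n : Nat) : ∀ (pool : List Int), pool.length = n → ∀ (b cnt : Int),
    selLoop pool b cnt = solutionLoop (PySem.List.sorted pool (fun x => x)) b cnt := by
  induction n using Nat.strong_induction_on with
  | _ n ih =>
    intro pool hlen b cnt
    rw [selLoop]
    cases hm : PySem.List.min? pool (fun x => x) with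
    | none =>
        have : pool = [] := (PySem.List.min?_eq_none_iff _ _).mp hm
        simp [this, PySem.List.sorted, solutionLoop]
    | some m =>
        rw [sorted_eq_min_cons pool m hm, solutionLoop]
        by_cases h : m > b
        · simp [h]
        · simp only [h, if_false]
          exact ih _ (by
            rw [← hlen, List.length_erase_of_mem (PySem.List.min?_mem hm)]
            have := List.length_pos_of_mem (PySem.List.min?_mem hm); omega) _ rfl _ _

-- ===== VERDICT (by name: the statement is the Claim_ definition above) =====
theorem solution_spec : Claim_equal_solution := by
  intro d budget _
  unfold Spec_solution solution solution_alt
  exact (selLoop_eq d.length d rfl budget 0).symm
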